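-- pv_equiv track=rewrite | github.com/UAOleksandr/OSINT-1 | parsers.py | find_element
-- ===== SOURCE A (Python) =====
-- def find_element(data, header: list, key: str, value: str):
--
--     output_arr = []
--     if len(data) == 0:
--         return None
--     for sublist in data:
--         if sublist[header.index(key)] in value:
--             output_arr.append(sublist)
--
--     return (output_arr, data.index(output_arr[0])) if len(output_arr) > 0 else (None, None)
-- ===== SOURCE B (Python) =====
-- def find_element(data, header: list, key: str, value: str):
--     if len(data) == 0:
--         return None
--     idx = header.index(key)
--
--     def go(chunk, base):
--         # divide and conquer over data: returns (matching rows of chunk in order,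
--         # absolute index of the first match or None); recursion depth O(log n)
--         if len(chunk) == 1:
--             return ([chunk[0]], base) if chunk[0][idx] in value else ([], None)
--         mid = len(chunk) // 2
--         lm, lf = go(chunk[:mid], base)
--         rm, rf = go(chunk[mid:], base + mid)
--         return (lm + rm, lf if lf is not None else rf)
--
--     matches, first = go(data, 0)
--     return (matches, first) if matches else (None, None)
-- ===== Notes on version B (the rewrite author's own statement) =====
-- stated objective: alternative
-- what changed: B replaces A's linear filter loop plus trailing data.index scan by a divide-and-conquer recursion that splits data in half, concatenates the halves' matches and combines first-match indices with left preference (header.index computed once).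
-- outside the precondition, e.g. on find_element([], ['id'], 'id', 'x'): A returns None, B returns None
import Mathlib
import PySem

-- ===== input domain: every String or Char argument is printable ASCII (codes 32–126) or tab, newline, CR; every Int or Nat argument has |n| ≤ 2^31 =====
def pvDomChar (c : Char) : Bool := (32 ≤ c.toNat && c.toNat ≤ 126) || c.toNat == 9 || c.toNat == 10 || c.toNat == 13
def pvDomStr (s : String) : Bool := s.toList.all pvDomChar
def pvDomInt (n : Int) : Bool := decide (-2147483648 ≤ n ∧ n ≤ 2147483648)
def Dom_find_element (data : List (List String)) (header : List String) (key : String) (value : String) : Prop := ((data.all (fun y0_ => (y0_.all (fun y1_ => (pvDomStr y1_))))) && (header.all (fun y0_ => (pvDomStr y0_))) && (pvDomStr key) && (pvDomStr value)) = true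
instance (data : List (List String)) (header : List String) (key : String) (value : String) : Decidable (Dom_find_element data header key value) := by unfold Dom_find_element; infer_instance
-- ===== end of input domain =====

-- B replaces A's filter loop + trailing data.index scan by a divide-and-conquer recursion
-- (split data in half, concatenate matches, combine first-match indices with left preference;
-- header.index computed once). Objective: alternative. Pre_ excludes inputs where Python A
-- raises (key not in header, row too short) and the empty-data case, where A returns a bare
-- None (not a pair of the declared return type); B returns bare None there too.


-- ===== PORT A =====
-- literal port of A: per-row `header.index(key)` and `sublist[...] in value`, then a final
-- `data.index(output_arr[0])` scan; `none` results of index?/pyGet? (Python raises) and the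
-- empty-data bare-None return are outside Pre_ and mapped to (none, none).
def find_element (data : List (List String)) (header : List String) (key : String) (value : String) : Option (List (List String)) × Option Int :=
  if data.length = 0 then (none, none)  -- Python returns bare None here; excluded by Pre_
  else
    let out? : Option (List (List String)) :=
      data.foldl (fun acc sublist =>
        acc.bind (fun output_arr =>
          (PySem.List.index? header key).bind (fun idx =>
            (PySem.List.pyGet? sublist (idx : Int)).map (fun s =>
              if PySem.Str.isIn s value then output_arr ++ [sublist] else output_arr))))
        (some [])
    match out? with
    | none => (none, none)  -- ValueError / IndexError; excluded by Pre_
    | some output_arr =>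
      match output_arr with
      | [] => (none, none)
      | x :: rest =>
        (some (x :: rest), (PySem.List.index? data x).map (fun n => (n : Int)))

-- ===== PORT B =====
-- literal port of B's `go`: divide and conquer; on a one-row chunk test the row, otherwise
-- split at len//2 and combine (matches concatenated, first index with left preference).
-- A row too short for the column (Python IndexError, excluded by Pre_) yields ([], none).
def pvGo (idx : Nat) (value : String) : List (List String) → Int → List (List String) × Option Int
  | [], _ => ([], none)  -- go is never called on an empty chunk in Python; excluded shape
  | [r], base =>
      match PySem.List.pyGet? r (idx : Int) with
      | none => ([], none)  -- IndexError; excluded by Pre_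
      | some s => if PySem.Str.isIn s value then ([r], some base) else ([], none)
  | r₁ :: r₂ :: rs, base =>
      let chunk := r₁ :: r₂ :: rs
      let mid := chunk.length / 2
      let l := pvGo idx value (chunk.take mid) base
      let r := pvGo idx value (chunk.drop mid) (base + (mid : Int))
      (l.1 ++ r.1, match l.2 with | some j => some j | none => r.2)
  termination_by chunk _ => chunk.length
  decreasing_by
    · simp only [List.length_take]; simp; omega
    · simp only [List.length_drop]; simp; omega

-- literal port of B: empty guard, index hoisted once, then the divide-and-conquer go.
def find_element_alt (data : List (List String)) (header : List String) (key : String) (value : String) : Option (List (List String)) × Option Int :=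
  match data with
  | [] => (none, none)  -- Python returns bare None here; excluded by Pre_
  | _ :: _ =>
    match PySem.List.index? header key with
    | none => (none, none)  -- ValueError; excluded by Pre_
    | some idx =>
      let st := pvGo idx value data 0
      match st.1 with
      | [] => (none, none)
      | out => (some out, st.2)

-- ===== PRECONDITION & SPEC =====
-- Pre_ admits exactly the inputs on which Python A returns a pair: data non-empty (on empty data
-- A returns a bare None, not a value of the declared pair type), key present in header (else
-- ValueError) and every row long enough for the key's column (else IndexError).
def Pre_find_element (data : List (List String)) (header : List String) (key : String) (value : String) : Prop :=
  data ≠ [] ∧ key ∈ header ∧ ∀ row ∈ data, header.idxOf key < row.length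
instance (data : List (List String)) (header : List String) (key : String) (value : String) : Decidable (Pre_find_element data header key value) := by unfold Pre_find_element; infer_instance

def pvWitness_find_element : List (List String) × List String × String × String :=
  ([["x", "a"], ["y", "b"], ["x", "c"]], ["id", "v"], "id", "xyz")

def Spec_find_element (data : List (List String)) (header : List String) (key : String) (value : String) (out : Option (List (List String)) × Option Int) : Prop := out = find_element_alt data header key value
instance (data : List (List String)) (header : List String) (key : String) (value : String) (out : Option (List (List String)) × Option Int) : Decidable (Spec_find_element data header key value out) := by unfold Spec_find_element; infer_instance

-- ===== CLAIM (what is proved, stated in full; the proofs are below) =====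
def Claim_equal_find_element : Prop := ∀ (data : List (List String)) (header : List String) (key : String) (value : String), Dom_find_element data header key value → Pre_find_element data header key value → Spec_find_element data header key value (find_element data header key value)

-- ===== LEMMAS AND PROOFS =====

-- the row predicate both programs test, once index? header key = some idx and rows are long enough
def pvMatch (idx : Nat) (value : String) (row : List String) : Bool :=
  PySem.Str.isIn (row.getD idx "") value

-- first matching index, offset by s
def pvFirstIdx (idx : Nat) (value : String) : List (List String) → Int → Option Int
  | [], _ => none
  | d :: ds, s => if pvMatch idx value d then some s else pvFirstIdx idx value ds (s + 1)

theorem pvA_loop (idx : Nat) (value : String)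
    (data : List (List String)) (hrows : ∀ row ∈ data, idx < row.length) (acc : List (List String)) :
    data.foldl (fun acc sublist =>
        acc.bind (fun a =>
          (PySem.List.pyGet? sublist (idx : Int)).map (fun s =>
            if PySem.Str.isIn s value then a ++ [sublist] else a)))
      (some acc) = some (acc ++ data.filter (pvMatch idx value)) := by
  induction data generalizing acc with
  | nil => simp
  | cons d ds ih =>
    have hd : idx < d.length := hrows d (by simp)
    have hget : PySem.List.pyGet? d (idx : Int) = some (d.getD idx "") := by
      rw [PySem.List.pyGet?_natCast]
      simp [List.getElem?_eq_getElem hd]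
    rw [List.foldl_cons]
    simp only [Option.bind_some, hget, Option.map_some]
    rw [ih (fun r hr => hrows r (List.mem_cons_of_mem d hr))]
    by_cases h : pvMatch idx value d
    · have h' : PySem.Str.isIn (d.getD idx "") value = true := h
      simp only [pysem, List.getD_eq_getElem?_getD] at h'
      simp [pysem, pvMatch, h']
    · have h' : PySem.Str.isIn (d.getD idx "") value = false := by
        simpa [pvMatch] using h
      simp only [pysem, List.getD_eq_getElem?_getD] at h'
      simp [pysem, pvMatch, h']

theorem pvFirstIdx_append (idx : Nat) (value : String) (l r : List (List String)) (s : Int) :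
    pvFirstIdx idx value (l ++ r) s =
      (match pvFirstIdx idx value l s with
       | some j => some j
       | none => pvFirstIdx idx value r (s + (l.length : Int))) := by
  induction l generalizing s with
  | nil => simp [pvFirstIdx]
  | cons d ds ih =>
    by_cases h : pvMatch idx value d
    · simp [pvFirstIdx, h]
    · simp only [List.cons_append, pvFirstIdx, h, Bool.false_eq_true, if_false]
      rw [ih (s + 1)]
      have : s + 1 + (ds.length : Int) = s + ((ds.length : Int) + 1) := by ring
      simp [this]

-- the divide-and-conquer go computes the filter and the first matching index
theorem pvGo_spec (idx : Nat) (value : String) (chunk : List (List String)) (base : Int)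
    (hrows : ∀ row ∈ chunk, idx < row.length) :
    pvGo idx value chunk base = (chunk.filter (pvMatch idx value), pvFirstIdx idx value chunk base) := by
  induction chunk, base using pvGo.induct idx value with
  | case1 _ => simp [pvGo, pvFirstIdx]
  | case2 r base hnone =>
    exfalso
    have hd : idx < r.length := hrows r (by simp)
    rw [PySem.List.pyGet?_natCast] at hnone
    simp [List.getElem?_eq_getElem hd] at hnone
  | case3 r base s hsome hin =>
    have hd : idx < r.length := hrows r (by simp)
    have hs : s = r.getD idx "" := by
      rw [PySem.List.pyGet?_natCast] at hsome
      simp [List.getElem?_eq_getElem hd] at hsome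
      simp [hsome, List.getD_eq_getElem?_getD, List.getElem?_eq_getElem hd]
    have hm : pvMatch idx value r = true := by rw [pvMatch, ← hs]; exact hin
    simp [pvGo, hsome, pvFirstIdx, hm]
    simpa [PySem.Str.isIn] using hin
  | case4 r base s hsome hin =>
    have hd : idx < r.length := hrows r (by simp)
    have hs : s = r.getD idx "" := by
      rw [PySem.List.pyGet?_natCast] at hsome
      simp [List.getElem?_eq_getElem hd] at hsome
      simp [hsome, List.getD_eq_getElem?_getD, List.getElem?_eq_getElem hd]
    have hm : pvMatch idx value r = false := by
      rw [pvMatch, ← hs]; exact Bool.not_eq_true _ ▸ eq_false_of_ne_true hin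
    simp [pvGo, hsome, pvFirstIdx, hm]
    simpa [PySem.Str.isIn] using eq_false_of_ne_true hin
  | case5 r1 r2 rs base chunkv midv ihl ihr =>
    have hmid : (r1 :: r2 :: rs).length / 2 ≤ (r1 :: r2 :: rs).length := Nat.div_le_self _ _
    have hl := ihl (fun row hr => hrows row (List.mem_of_mem_take hr))
    have hr := ihr (fun row hd => hrows row (List.mem_of_mem_drop hd))
    show pvGo idx value (r1 :: r2 :: rs) base = _
    simp only [chunkv, midv] at hl hr
    rw [pvGo, hl, hr]
    have hfa : ((r1 :: r2 :: rs).take ((r1 :: r2 :: rs).length / 2)).filter (pvMatch idx value)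
        ++ ((r1 :: r2 :: rs).drop ((r1 :: r2 :: rs).length / 2)).filter (pvMatch idx value)
        = (r1 :: r2 :: rs).filter (pvMatch idx value) := by
      rw [← List.filter_append, List.take_append_drop]
    have hfi := pvFirstIdx_append idx value
      ((r1 :: r2 :: rs).take ((r1 :: r2 :: rs).length / 2))
      ((r1 :: r2 :: rs).drop ((r1 :: r2 :: rs).length / 2)) base
    rw [List.take_append_drop] at hfi
    have hlen : (((r1 :: r2 :: rs).take ((r1 :: r2 :: rs).length / 2)).length : Int)
        = (((r1 :: r2 :: rs).length / 2 : Nat) : Int) := by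
      rw [List.length_take, Nat.min_eq_left hmid]
    rw [hlen] at hfi
    rw [hfa, hfi]

-- the first matching row's `data.index` equals the tracked first index
theorem pv_index_eq_first (idx : Nat) (value : String) :
    ∀ (data : List (List String)) (s : Int) (x : List String) (l : List (List String)),
      data.filter (pvMatch idx value) = x :: l →
      (PySem.List.index? data x).map (fun n => (s + (n : Int))) = pvFirstIdx idx value data s := by
  intro data
  induction data with
  | nil => intro s x l h; simp at h
  | cons d ds ih =>
    intro s x l h
    by_cases hp : pvMatch idx value d
    · rw [List.filter_cons_of_pos hp] at h
      obtain ⟨rfl, rfl⟩ := List.cons.inj h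
      rw [PySem.List.index?_cons_self]
      simp [pvFirstIdx, hp]
    · rw [List.filter_cons_of_neg hp] at h
      have hx : pvMatch idx value x = true := by
        have : x ∈ ds.filter (pvMatch idx value) := by rw [h]; simp
        exact (List.mem_filter.mp this).2
      have hne : d ≠ x := by rintro rfl; rw [hx] at hp; exact hp rfl
      rw [PySem.List.index?_cons_of_ne ds hne]
      simp only [pvFirstIdx, hp, Bool.false_eq_true, if_false]
      rw [← ih (s + 1) x l h]
      cases hI : PySem.List.index? ds x <;> simp
      ring

-- ===== VERDICT (by name: the statement is the Claim_ definition above) =====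
theorem find_element_spec : Claim_equal_find_element := by
  intro data header key value _ hpre
  obtain ⟨hne, hkey, hrows0⟩ := hpre
  obtain ⟨idx, hidx⟩ := Option.isSome_iff_exists.mp ((PySem.List.index?_isSome_iff header key).mpr hkey)
  have hidxOf : header.idxOf key = idx := by
    rw [List.idxOf_eq_getD_idxOf?, ← PySem.List.index?_eq_idxOf?, hidx]; rfl
  have hrows : ∀ row ∈ data, idx < row.length := by
    intro r hr; have := hrows0 r hr; rwa [hidxOf] at this
  obtain ⟨d, ds, rfl⟩ := List.exists_cons_of_ne_nil hne
  unfold Spec_find_element find_element find_element_alt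
  rw [if_neg (by simp)]
  simp only [hidx, Option.bind_some]
  rw [pvA_loop idx value _ hrows []]
  rw [pvGo_spec idx value _ 0 hrows]
  simp only [List.nil_append]
  cases hflt : (d :: ds).filter (pvMatch idx value) with
  | nil => simp
  | cons x l =>
    have := pv_index_eq_first idx value (d :: ds) 0 x l hflt
    simp only [zero_add] at this
    simpa using this
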